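-- pv_equiv track=rewrite | github.com/Ninni51/its-esercizi | Lezione_01/matrix.py | caricoNullo
-- ===== SOURCE A (Python) =====
-- def calcolaCarico(mat: list[list[int]], riga: int, colonna: int) -> int:
--     somma_riga = sum(mat[riga])
--     somma_colonna = sum(row[colonna] for row in mat)
--     carico = somma_riga - somma_colonna
--     return carico
--
-- def caricoNullo(mat:list[list[int]]) -> list:
--     nulli = []
--     for r in range(len(mat)):
--         for c in range(len(mat[r])):
--             carico = calcolaCarico(mat, r, c)
--             if carico == 0:
--                 nulli.append((r+1, c+1))
--     return nulli
-- ===== SOURCE B (Python) =====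
-- def caricoNullo(mat: list[list[int]]) -> list:
--     row_sums = [sum(row) for row in mat]
--     ncols = len(mat[0]) if mat else 0
--     col_sums = [sum(row[c] for row in mat) for c in range(ncols)]
--     return [(r + 1, c + 1)
--             for r in range(len(mat))
--             for c in range(ncols)
--             if row_sums[r] == col_sums[c]]
-- ===== Notes on version B (the rewrite author's own statement) =====
-- stated objective: faster
-- what changed: Precompute all row sums and column sums once, then test each cell with two O(1) lookups instead of recomputing its row sum and column sum from scratch.
import Mathlib
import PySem

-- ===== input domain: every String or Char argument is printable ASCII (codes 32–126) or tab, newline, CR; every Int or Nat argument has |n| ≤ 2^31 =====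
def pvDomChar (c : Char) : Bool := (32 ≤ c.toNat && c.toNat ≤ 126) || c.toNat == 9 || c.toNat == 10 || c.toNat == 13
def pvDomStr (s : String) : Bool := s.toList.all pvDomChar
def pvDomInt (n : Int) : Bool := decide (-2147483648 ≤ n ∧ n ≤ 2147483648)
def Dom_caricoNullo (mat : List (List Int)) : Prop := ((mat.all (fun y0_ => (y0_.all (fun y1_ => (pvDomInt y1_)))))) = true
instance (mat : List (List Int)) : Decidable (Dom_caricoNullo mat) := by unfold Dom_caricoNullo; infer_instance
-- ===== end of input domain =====

-- B precomputes all row sums and column sums once and tests each cell with two lookups,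
-- instead of A's recomputation of a full row sum and column sum per cell (objective: faster).

-- ===== PORT A =====
-- carico = sum(mat[riga]) - sum(row[colonna] for row in mat); none = IndexError
def calcolaCarico (mat : List (List Int)) (riga colonna : Int) : Option Int :=
  match PySem.List.pyGet? mat riga with
  | none => none
  | some row =>
    let somma_riga := row.foldl (· + ·) 0
    match mat.foldl (fun acc r =>
        match acc, PySem.List.pyGet? r colonna with
        | some a, some v => some (a + v)
        | _, _ => none) (some 0) with
    | none => none
    | some somma_colonna => some (somma_riga - somma_colonna)

def caricoNullo (mat : List (List Int)) : List (Int × Int) :=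
  (PySem.List.pyRange 0 mat.length 1).foldl (fun nulli r =>
    (PySem.List.pyRange 0 (PySem.List.pyGetD mat r []).length 1).foldl (fun nulli c =>
      match calcolaCarico mat r c with
      | some 0 => nulli ++ [(r + 1, c + 1)]
      | _ => nulli) nulli) []

-- ===== PORT B =====
-- ncols = len(mat[0]) if mat else 0
def pvNcols (mat : List (List Int)) : Int := match mat with | [] => 0 | r0 :: _ => r0.length

def caricoNullo_alt (mat : List (List Int)) : List (Int × Int) :=
  let rowSums := mat.map (fun row => row.foldl (· + ·) 0)
  let ncols : Int := pvNcols mat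
  let colSums := (PySem.List.pyRange 0 ncols 1).map (fun c =>
      mat.foldl (fun a row => a + PySem.List.pyGetD row c 0) 0)
  (PySem.List.pyRange 0 mat.length 1).foldl (fun out r =>
    (PySem.List.pyRange 0 ncols 1).foldl (fun out c =>
      if PySem.List.pyGetD rowSums r 0 = PySem.List.pyGetD colSums c 0
      then out ++ [(r + 1, c + 1)] else out) out) []

-- ===== PRECONDITION & SPEC =====
-- Pre_ excludes ragged (non-rectangular) matrices, on which A raises IndexError
-- (row[colonna] for a row shorter than row riga).
def Pre_caricoNullo (mat : List (List Int)) : Prop :=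
  ∀ row ∈ mat, row.length = (mat.headD []).length
instance (mat : List (List Int)) : Decidable (Pre_caricoNullo mat) := by unfold Pre_caricoNullo; infer_instance

def pvWitness_caricoNullo : List (List Int) := [[1, 2], [2, 1]]

def Spec_caricoNullo (mat : List (List Int)) (out : List (Int × Int)) : Prop := out = caricoNullo_alt mat
instance (mat : List (List Int)) (out : List (Int × Int)) : Decidable (Spec_caricoNullo mat out) := by unfold Spec_caricoNullo; infer_instance

-- ===== CLAIM (what is proved, stated in full; the proofs are below) =====
def Claim_equal_caricoNullo : Prop := ∀ (mat : List (List Int)), Dom_caricoNullo mat → Pre_caricoNullo mat → Spec_caricoNullo mat (caricoNullo mat)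

-- ===== LEMMAS AND PROOFS =====

lemma pvNcols_eq_head : pvNcols mat = (mat.headD []).length := by
  cases mat <;> simp [pvNcols]

-- under Pre_, every row has length = pvNcols
lemma row_len (mat : List (List Int)) (h : Pre_caricoNullo mat) {row : List Int}
    (hr : row ∈ mat) : (row.length : Int) = pvNcols mat := by
  rw [pvNcols_eq_head]; exact_mod_cast h row hr

-- A's inner column-sum fold succeeds and equals B's column sum, when c is in range for every row
lemma colsum_fold (mat : List (List Int)) (c : Int) (a : Int)
    (h : ∀ row ∈ mat, 0 ≤ c ∧ c < (row.length : Int)) :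
    mat.foldl (fun acc r =>
        match acc, PySem.List.pyGet? r c with
        | some a, some v => some (a + v)
        | _, _ => none) (some a)
    = some (mat.foldl (fun a row => a + PySem.List.pyGetD row c 0) a) := by
  induction mat generalizing a with
  | nil => simp
  | cons row rest ih =>
    obtain ⟨h0, h1⟩ := h row (by simp)
    have hget : PySem.List.pyGet? row c = some row[c.toNat] :=
      PySem.List.pyGet?_eq_some_getElem _ h0 h1
    have hgetD : PySem.List.pyGetD row c 0 = row[c.toNat] :=
      PySem.List.pyGetD_eq_getElem _ _ h0 h1
    simp only [List.foldl_cons, hget, hgetD]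
    exact ih _ (fun r hr => h r (by simp [hr]))

theorem caricoNullo_spec : Claim_equal_caricoNullo := by
  intro mat _ hpre
  unfold Spec_caricoNullo caricoNullo caricoNullo_alt
  simp only []
  apply PySem.List.foldl_congr_mem
  intro acc r hr
  rw [PySem.List.mem_pyRange_one] at hr
  obtain ⟨hr0, hr1⟩ := hr
  have hrlt : r.toNat < mat.length := by omega
  have hrow : PySem.List.pyGetD mat r [] = mat[r.toNat] :=
    PySem.List.pyGetD_eq_getElem _ _ hr0 hr1
  have hmem : mat[r.toNat] ∈ mat := List.getElem_mem hrlt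
  have hlen : ((mat[r.toNat] : List Int).length : Int) = pvNcols mat := row_len mat hpre hmem
  rw [hrow, hlen]
  show (PySem.List.pyRange 0 (pvNcols mat) 1).foldl _ acc
      = (PySem.List.pyRange 0 (pvNcols mat) 1).foldl _ acc
  apply PySem.List.foldl_congr_mem
  intro acc2 c hc
  rw [PySem.List.mem_pyRange_one] at hc
  obtain ⟨hc0, hc1⟩ := hc
  -- evaluate calcolaCarico
  have hgetr : PySem.List.pyGet? mat r = some mat[r.toNat] :=
    PySem.List.pyGet?_eq_some_getElem _ hr0 hr1
  have hall : ∀ row ∈ mat, 0 ≤ c ∧ c < (row.length : Int) := by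
    intro row hrowm
    refine ⟨hc0, ?_⟩
    rw [row_len mat hpre hrowm]; exact hc1
  have hcar : calcolaCarico mat r c
      = some ((mat[r.toNat] : List Int).foldl (· + ·) 0
              - mat.foldl (fun a row => a + PySem.List.pyGetD row c 0) 0) := by
    unfold calcolaCarico
    rw [hgetr]
    simp only [colsum_fold mat c 0 hall]
  rw [hcar]
  -- evaluate B's lookups
  have hrsum : PySem.List.pyGetD (mat.map (fun row => row.foldl (· + ·) 0)) r 0
      = (mat[r.toNat] : List Int).foldl (· + ·) 0 := by
    rw [PySem.List.pyGetD_eq_getElem _ _ hr0 (by simpa using hr1)]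
    simp
  have hcsum : PySem.List.pyGetD
      ((PySem.List.pyRange 0 (pvNcols mat) 1).map
        (fun c => mat.foldl (fun a row => a + PySem.List.pyGetD row c 0) 0)) c 0
      = mat.foldl (fun a row => a + PySem.List.pyGetD row c 0) 0 :=
    PySem.List.pyGetD_map_pyRange_of_nonneg _ _ _ _ hc0 hc1
  rw [hrsum, hcsum]
  by_cases h : (mat[r.toNat] : List Int).foldl (· + ·) 0
      = mat.foldl (fun a row => a + PySem.List.pyGetD row c 0) 0
  · rw [if_pos h]
    have : (mat[r.toNat] : List Int).foldl (· + ·) 0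
        - mat.foldl (fun a row => a + PySem.List.pyGetD row c 0) 0 = 0 := by omega
    rw [this]; rfl
  · rw [if_neg h]
    have hne : (mat[r.toNat] : List Int).foldl (· + ·) 0
        - mat.foldl (fun a row => a + PySem.List.pyGetD row c 0) 0 ≠ 0 := by omega
    cases hd : (mat[r.toNat] : List Int).foldl (· + ·) 0
        - mat.foldl (fun a row => a + PySem.List.pyGetD row c 0) 0 with
    | ofNat n => cases n with
      | zero => exact absurd hd hne
      | succ k => rfl
    | negSucc n => rfl
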